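-- pv_equiv track=rewrite | github.com/Bobcatsoap/jy-server | cell/RoomType13Calculator.py | find_three_with_two_single
-- ===== SOURCE A (Python) =====
-- def find_three_with_two_single(pre_card_val, card2, room_info):
--     """
--     找所有3带2单
--     """
--     if len(card2) < 5:
--         return []
--     # 找3张
--     card_filter = set()
--     all_itm_cards = []
--     for k in card2:
--         if k > pre_card_val and card2.count(k) >= 3 and k not in card_filter:
--             itm_cards = [k] * 3
--             # 找2单
--             two = []
--             for v in card2:
--                 if v != k and v not in two:
--                     two.append(v)
--                     if len(two) == 2:
--                         itm_cards += [-1] * 2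
--                         all_itm_cards.append(itm_cards)
--                         card_filter.add(k)
--                         break
--     return all_itm_cards
-- ===== SOURCE B (Python) =====
-- def find_three_with_two_single(pre_card_val, card2, room_info):
--     if len(card2) < 5:
--         return []
--     counts = {}
--     for k in card2:
--         counts[k] = counts.get(k, 0) + 1
--     if len(counts) < 3:
--         return []
--     return [[k, k, k, -1, -1] for k in counts if k > pre_card_val and counts[k] >= 3]
-- ===== Notes on version B (the rewrite author's own statement) =====
-- stated objective: simpler
-- what changed: A's nested inner scan that looks for two distinct singles per candidate triple is replaced by a counts table built in one pass plus a precomputed 'at least 3 distinct values' guard, then a single pass over the distinct values; the membership-filter set also disappears.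
import Mathlib
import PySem

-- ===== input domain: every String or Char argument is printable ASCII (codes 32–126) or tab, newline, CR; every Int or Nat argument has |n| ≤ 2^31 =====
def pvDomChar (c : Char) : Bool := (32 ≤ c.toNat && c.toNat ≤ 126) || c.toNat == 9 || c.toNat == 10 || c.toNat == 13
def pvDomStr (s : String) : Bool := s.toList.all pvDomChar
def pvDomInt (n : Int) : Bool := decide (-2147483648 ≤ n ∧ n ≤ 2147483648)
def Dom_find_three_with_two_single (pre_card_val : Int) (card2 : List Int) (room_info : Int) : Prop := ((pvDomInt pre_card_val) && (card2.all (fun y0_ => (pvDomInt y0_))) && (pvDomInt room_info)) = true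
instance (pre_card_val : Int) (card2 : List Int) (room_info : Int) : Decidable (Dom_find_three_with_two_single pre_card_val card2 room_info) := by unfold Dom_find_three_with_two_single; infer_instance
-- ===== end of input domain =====

-- B replaces A's nested two-singles scan by a counts table built once plus a
-- precomputed `at least 3 distinct values` guard, then a single pass over the
-- distinct values (objective: simpler).

-- ===== PORT A =====
-- the inner `for v in card2: …` two-singles loop with its break, returning
-- whether two distinct singles were found (the itm_cards/-1 bookkeeping of the
-- loop is performed by the caller exactly when this returns true)
def pvFindTwo (k : Int) (rest : List Int) (two : List Int) : Bool :=
  match rest with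
  | [] => false
  | v :: vs =>
    if v ≠ k ∧ v ∉ two then
      let two' := two ++ [v]
      if two'.length = 2 then true
      else pvFindTwo k vs two'
    else pvFindTwo k vs two

def find_three_with_two_single (pre_card_val : Int) (card2 : List Int) (room_info : Int) : List (List Int) :=
  if card2.length < 5 then []
  else
    let st := card2.foldl
      (fun (st : PySem.Set Int × List (List Int)) k =>
        if pre_card_val < k ∧ 3 ≤ PySem.List.count card2 k ∧ k ∉ st.1 then
          if pvFindTwo k card2 [] then (PySem.Set.add st.1 k, st.2 ++ [[k, k, k, -1, -1]])
          else st
        else st)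
      (PySem.Set.empty, [])
    st.2

-- ===== PORT B =====
def find_three_with_two_single_alt (pre_card_val : Int) (card2 : List Int) (room_info : Int) : List (List Int) :=
  if card2.length < 5 then []
  else
    let counts : PySem.Dict Int Int :=
      card2.foldl (fun d k => PySem.Dict.insert d k (PySem.Dict.getD d k 0 + 1)) PySem.Dict.empty
    if PySem.Dict.size counts < 3 then []
    else
      ((PySem.Dict.keys counts).filter
          (fun k => decide (pre_card_val < k) && decide (3 ≤ PySem.Dict.getD counts k 0))).map
        (fun k => [k, k, k, -1, -1])

-- ===== PRECONDITION & SPEC =====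
def Spec_find_three_with_two_single (pre_card_val : Int) (card2 : List Int) (room_info : Int) (out : List (List Int)) : Prop := out = find_three_with_two_single_alt pre_card_val card2 room_info
instance (pre_card_val : Int) (card2 : List Int) (room_info : Int) (out : List (List Int)) : Decidable (Spec_find_three_with_two_single pre_card_val card2 room_info out) := by unfold Spec_find_three_with_two_single; infer_instance

-- ===== CLAIM (what is proved, stated in full; the proofs are below) =====
def Claim_equal_find_three_with_two_single : Prop := ∀ (pre_card_val : Int) (card2 : List Int) (room_info : Int), Dom_find_three_with_two_single pre_card_val card2 room_info → Spec_find_three_with_two_single pre_card_val card2 room_info (find_three_with_two_single pre_card_val card2 room_info)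

-- ===== LEMMAS AND PROOFS =====

-- the values emitted by A's outer loop, in order
def pvEmit (pre : Int) (card2 : List Int) : List Int → PySem.Set Int → List Int
  | [], _ => []
  | k :: rest, s =>
    if pre < k ∧ 3 ≤ PySem.List.count card2 k ∧ k ∉ s then
      if pvFindTwo k card2 [] then k :: pvEmit pre card2 rest (PySem.Set.add s k)
      else pvEmit pre card2 rest s
    else pvEmit pre card2 rest s

def pvQ (pre : Int) (card2 : List Int) (k : Int) : Bool :=
  decide (pre < k) && decide (3 ≤ PySem.List.count card2 k) && pvFindTwo k card2 []

theorem pvFoldlA (pre : Int) (card2 : List Int) :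
    ∀ (l : List Int) (s : PySem.Set Int) (acc : List (List Int)),
    (l.foldl
      (fun (st : PySem.Set Int × List (List Int)) k =>
        if pre < k ∧ 3 ≤ PySem.List.count card2 k ∧ k ∉ st.1 then
          if pvFindTwo k card2 [] then (PySem.Set.add st.1 k, st.2 ++ [[k, k, k, -1, -1]])
          else st
        else st)
      (s, acc)).2
    = acc ++ (pvEmit pre card2 l s).map (fun k => [k, k, k, -1, -1]) := by
  intro l
  induction l with
  | nil => intro s acc; simp [pvEmit]
  | cons k rest ih =>
    intro s acc
    simp only [List.foldl_cons, pvEmit]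
    by_cases h : pre < k ∧ 3 ≤ PySem.List.count card2 k ∧ k ∉ s
    · rw [if_pos h, if_pos h]
      by_cases h2 : pvFindTwo k card2 [] = true
      · rw [if_pos h2, if_pos h2, ih]
        simp
      · rw [if_neg h2, if_neg h2, ih]
    · rw [if_neg h, if_neg h, ih]

theorem pvEmit_char (pre : Int) (card2 : List Int) :
    ∀ (l : List Int) (s : PySem.Set Int),
    pvEmit pre card2 l s
      = (PySem.Set.ofList l).filter (fun k => pvQ pre card2 k && !(decide (k ∈ s))) := by
  intro l
  induction l with
  | nil => intro s; simp [pvEmit, PySem.Set.ofList_nil]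
  | cons k rest ih =>
    intro s
    rw [PySem.Set.ofList_cons]
    by_cases h : pre < k ∧ 3 ≤ PySem.List.count card2 k ∧ k ∉ s
    · by_cases h2 : pvFindTwo k card2 [] = true
      swap
      · have hq : (pvQ pre card2 k && !(decide (k ∈ s))) = false := by
          simp [pvQ, h2]
        simp only [pvEmit, if_pos h, if_neg h2, List.filter_cons, hq]
        rw [ih]
        unfold PySem.Set.discard
        rw [List.filter_filter]
        refine (List.filter_congr ?_).symm
        intro x hx
        by_cases hxk : x = k
        · simp only [hxk]
          rw [hq]
          simp
        · simp [hxk]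
      · have hcnt : (3:ℕ) ≤ List.count k card2 := h.2.1
        have hq : (pvQ pre card2 k && !(decide (k ∈ s))) = true := by
          simp [pvQ, h.1, h2, h.2.2, hcnt]
        simp only [pvEmit, if_pos h, if_pos h2]
        rw [List.filter_cons, if_pos hq, ih]
        unfold PySem.Set.discard
        rw [List.filter_filter]
        refine congrArg (List.cons k) (List.filter_congr ?_)
        intro x hx
        by_cases hxk : x = k
        · simp [hxk, PySem.Set.mem_add]
        · simp [hxk, PySem.Set.mem_add]
    · have hq : (pvQ pre card2 k && !(decide (k ∈ s))) = false := by
        rcases not_and_or.mp h with h1 | h'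
        · simp [pvQ, h1]
        rcases not_and_or.mp h' with h2 | h3
        · have h2' : ¬ (3:ℕ) ≤ List.count k card2 := fun hc => h2 hc
          simp [pvQ, h2']
        · simp [pvQ, not_not.mp h3]
      simp only [pvEmit, if_neg h, List.filter_cons, hq]
      rw [ih]
      unfold PySem.Set.discard
      rw [List.filter_filter]
      refine (List.filter_congr ?_).symm
      intro x hx
      by_cases hxk : x = k
      · simp only [hxk]
        rw [hq]
        simp
      · simp [hxk]
    
theorem pvLen_le_update (l : List Int) : ∀ (s : PySem.Set Int),
    s.length ≤ (PySem.Set.update s l).length := by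
  induction l with
  | nil => intro s; simp [PySem.Set.update_nil]
  | cons x xs ih =>
    intro s
    rw [PySem.Set.update_cons]
    refine le_trans ?_ (ih (PySem.Set.add s x))
    rw [PySem.Set.add_eq_ite]
    split <;> simp

theorem pvFindTwo_iff (k : Int) :
    ∀ (l : List Int) (two : List Int), two.length ≤ 1 →
    (pvFindTwo k l two = true ↔
      2 ≤ (PySem.Set.update two (l.filter (fun x => x ≠ k))).length) := by
  intro l
  induction l with
  | nil =>
    intro two h
    simp [pvFindTwo, PySem.Set.update_nil]
    omega
  | cons v vs ih =>
    intro two h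
    by_cases hvk : v = k
    · have : ¬ (v ≠ k ∧ v ∉ two) := by simp [hvk]
      simp only [pvFindTwo, if_neg this]
      rw [ih two h]
      simp [hvk]
    · by_cases hvt : v ∈ two
      · have : ¬ (v ≠ k ∧ v ∉ two) := by simp [hvt]
        simp only [pvFindTwo, if_neg this]
        rw [ih two h]
        have : (List.filter (fun x => decide (x ≠ k)) (v :: vs)) =
            v :: List.filter (fun x => decide (x ≠ k)) vs := by simp [hvk]
        rw [this, PySem.Set.update_cons, PySem.Set.add_of_mem hvt]
      · have hc : (v ≠ k ∧ v ∉ two) := ⟨hvk, hvt⟩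
        have hf : (List.filter (fun x => decide (x ≠ k)) (v :: vs)) =
            v :: List.filter (fun x => decide (x ≠ k)) vs := by simp [hvk]
        by_cases hl : (two ++ [v]).length = 2
        · simp only [pvFindTwo, if_pos hc, if_pos hl]
          rw [hf, PySem.Set.update_cons, PySem.Set.add_of_not_mem hvt]
          simp only [true_iff]
          calc 2 = (two ++ [v]).length := hl.symm
            _ ≤ _ := pvLen_le_update _ _
        · have h' : (two ++ [v]).length ≤ 1 := by
            rw [List.length_append] at hl ⊢
            simp only [List.length_cons, List.length_nil] at hl ⊢
            omega
          simp only [pvFindTwo, if_pos hc, if_neg hl]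
          rw [ih (two ++ [v]) h', hf, PySem.Set.update_cons, PySem.Set.add_of_not_mem hvt]

theorem pvLen_filter_ne (l : List Int) (k : Int) (hk : k ∈ l) :
    (PySem.Set.ofList (l.filter (fun x => x ≠ k))).length + 1
      = (PySem.Set.ofList l).length := by
  have h1 : (PySem.Set.ofList (l.filter (fun x => x ≠ k))).Nodup := PySem.Set.nodup_ofList _
  have h2 : (PySem.Set.ofList l).Nodup := PySem.Set.nodup_ofList _
  have e1 := List.toFinset_card_of_nodup h1
  have e2 := List.toFinset_card_of_nodup h2
  have hfin : (PySem.Set.ofList (l.filter (fun x => x ≠ k))).toFinset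
      = (PySem.Set.ofList l).toFinset.erase k := by
    ext x
    simp [PySem.Set.mem_ofList, List.mem_filter, and_comm]
  rw [← e1, ← e2, hfin, Finset.card_erase_of_mem (by simp [PySem.Set.mem_ofList, hk])]
  have : 0 < (PySem.Set.ofList l).toFinset.card := by
    rw [Finset.card_pos]
    exact ⟨k, by simp [PySem.Set.mem_ofList, hk]⟩
  omega

-- ===== VERDICT (by name: the statement is the Claim_ definition above) =====
theorem find_three_with_two_single_spec : Claim_equal_find_three_with_two_single := by
  intro pre card2 room _
  unfold Spec_find_three_with_two_single find_three_with_two_single find_three_with_two_single_alt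
  by_cases h5 : card2.length < 5
  · simp [h5]
  · simp only [if_neg h5]
    rw [pvFoldlA pre card2 card2 PySem.Set.empty []]
    rw [PySem.Dict.foldl_insert_getD_add_one_eq_counter]
    simp only [List.nil_append]
    rw [pvEmit_char]
    have hfilter : (PySem.Set.ofList card2).filter
        (fun k => pvQ pre card2 k && !(decide (k ∈ PySem.Set.empty)))
        = (PySem.Set.ofList card2).filter (fun k => pvQ pre card2 k) := by
      refine List.filter_congr ?_
      intro x _
      simp [PySem.Set.empty]
    rw [hfilter]
    have hsize : PySem.Dict.size (PySem.Dict.counter card2) = (PySem.Set.ofList card2).length := by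
      have : (PySem.Dict.counter card2).keys = PySem.Set.ofList card2 :=
        PySem.Dict.keys_counter card2
      calc PySem.Dict.size (PySem.Dict.counter card2)
          = (PySem.Dict.counter card2).keys.length := by
            simp [PySem.Dict.size, PySem.Dict.keys]
        _ = _ := by rw [this]
    rw [hsize, PySem.Dict.keys_counter]
    have hT : ∀ x ∈ card2,
        (pvFindTwo x card2 [] = true ↔ 3 ≤ (PySem.Set.ofList card2).length) := by
      intro x hx
      rw [pvFindTwo_iff x card2 [] (by simp)]
      rw [PySem.Set.update_nil_left]
      have := pvLen_filter_ne card2 x hx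
      omega
    by_cases h3 : (PySem.Set.ofList card2).length < 3
    · simp only [if_pos h3]
      rw [List.filter_eq_nil_iff.mpr ?_]
      · simp
      intro x hx
      by_cases hq : (3 : ℕ) ≤ PySem.List.count card2 x
      · have hxc : x ∈ card2 := by
          have : 0 < List.count x card2 := by
            have : PySem.List.count card2 x = List.count x card2 := rfl
            omega
          exact List.count_pos_iff.mp this
        have := (hT x hxc)
        have hft : pvFindTwo x card2 [] = false := by
          rcases Bool.eq_false_or_eq_true (pvFindTwo x card2 []) with ht | hf
          · exact absurd (this.mp ht) (by omega)
          · exact hf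
        simp [pvQ, hft]
      · have hq' : ¬ (3:ℕ) ≤ List.count x card2 := hq
        simp [pvQ, hq']
    · simp only [if_neg h3]
      refine congrArg _ (List.filter_congr ?_)
      intro x hx
      by_cases hq : (3 : ℕ) ≤ PySem.List.count card2 x
      · have hxc : x ∈ card2 := by
          have : 0 < List.count x card2 := by
            have : PySem.List.count card2 x = List.count x card2 := rfl
            omega
          exact List.count_pos_iff.mp this
        have hft : pvFindTwo x card2 [] = true := (hT x hxc).mpr (by omega)
        have hcnt : PySem.Dict.getD (PySem.Dict.counter card2) x 0 = (List.count x card2 : Int) :=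
          PySem.Dict.getD_counter card2 x
        have : PySem.List.count card2 x = List.count x card2 := rfl
        simp [pvQ, hft, hcnt]
        rfl
      · have hcnt : PySem.Dict.getD (PySem.Dict.counter card2) x 0 = (List.count x card2 : Int) :=
          PySem.Dict.getD_counter card2 x
        have hq' : ¬ (3:ℕ) ≤ List.count x card2 := hq
        simp [pvQ, hcnt, hq']
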